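-- pv_equiv track=rewrite | github.com/MohammedAlewi/competitive-programming | leetcode/DP/Delete and Earn.py | get_childs
-- ===== SOURCE A (Python) =====
-- def get_childs(nums):
--     chidrens={}
--     for index in range(len(nums)):
--         if index-1 in chidrens and nums[index-1]== nums[index]:
--             chidrens[index]=chidrens[index-1]
--             continue
--         chidrens[index]=set()
--         for child_index in range(len(nums)):
--             if abs(nums[child_index] - nums[index])!=1:
--                 chidrens[index].add(child_index)
--
--     return chidrens
-- ===== SOURCE B (Python) =====
-- def get_childs(nums):
--     n = len(nums)
--     groups = {}
--     for i, v in enumerate(nums):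
--         groups.setdefault(v, []).append(i)
--     all_idx = set(range(n))
--     memo = {v: all_idx - set(groups.get(v - 1, [])) - set(groups.get(v + 1, []))
--             for v in groups}
--     return {i: memo[v] for i, v in enumerate(nums)}
-- ===== Notes on version B (the rewrite author's own statement) =====
-- stated objective: alternative
-- what changed: B never compares pairs of values: it groups indices by value in one pass, then obtains each distinct value's child set by set-difference (all indices minus the index groups of the two neighbouring values v-1 and v+1), and assembles the per-index dict by lookup; A recomputes an inner abs-difference scan per index.
import Mathlib
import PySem

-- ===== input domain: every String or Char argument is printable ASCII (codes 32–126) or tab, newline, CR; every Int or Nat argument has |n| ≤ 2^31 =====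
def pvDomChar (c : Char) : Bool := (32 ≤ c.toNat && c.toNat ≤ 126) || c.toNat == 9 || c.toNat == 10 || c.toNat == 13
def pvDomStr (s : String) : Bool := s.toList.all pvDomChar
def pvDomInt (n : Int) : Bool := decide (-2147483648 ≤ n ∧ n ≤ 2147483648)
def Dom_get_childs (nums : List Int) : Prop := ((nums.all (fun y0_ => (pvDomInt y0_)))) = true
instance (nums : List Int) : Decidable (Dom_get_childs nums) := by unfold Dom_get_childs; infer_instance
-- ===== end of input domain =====

-- B groups indices by value in one pass and builds each distinct value's child set by set
-- difference (all indices minus the groups of v-1 and v+1), instead of A's per-index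
-- pairwise abs-difference scan (objective: alternative).

-- ===== PORT A =====
def get_childs (nums : List Int) : List (Int × List Int) :=
  let chidrens : PySem.Dict Int (List Int) :=
    (PySem.List.pyRange 0 (nums.length : Int) 1).foldl
      (fun d index =>
        if d.contains (index - 1) && (PySem.List.pyGet? nums (index - 1) == PySem.List.pyGet? nums index) then
          d.insert index (d.getD (index - 1) [])
        else
          d.insert index
            ((PySem.List.pyRange 0 (nums.length : Int) 1).foldl
              (fun s child_index =>
                if (PySem.List.pyGetD nums child_index 0 - PySem.List.pyGetD nums index 0).natAbs ≠ 1 then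
                  PySem.Set.add s child_index
                else s)
              PySem.Set.empty))
      PySem.Dict.empty
  chidrens.items

-- ===== PORT B =====
def get_childs_alt (nums : List Int) : List (Int × List Int) :=
  let n : Int := nums.length
  let groups : PySem.Dict Int (List Int) :=
    (PySem.List.enumerate nums).foldl
      (fun d iv => d.modify iv.2 [] (fun l => l ++ [iv.1])) PySem.Dict.empty
  let allIdx : PySem.Set Int := PySem.Set.ofList (PySem.List.pyRange 0 n 1)
  let memo : PySem.Dict Int (List Int) :=
    groups.keys.foldl
      (fun m v =>
        m.insert v
          (PySem.Set.diff
            (PySem.Set.diff allIdx (PySem.Set.ofList (groups.getD (v - 1) [])))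
            (PySem.Set.ofList (groups.getD (v + 1) []))))
      PySem.Dict.empty
  ((PySem.List.enumerate nums).foldl
      (fun d iv => d.insert iv.1 (memo.getD iv.2 [])) PySem.Dict.empty).items

-- ===== PRECONDITION & SPEC =====
def Spec_get_childs (nums : List Int) (out : List (Int × List Int)) : Prop := out = get_childs_alt nums
instance (nums : List Int) (out : List (Int × List Int)) : Decidable (Spec_get_childs nums out) := by unfold Spec_get_childs; infer_instance

-- ===== CLAIM (what is proved, stated in full; the proofs are below) =====
def Claim_equal_get_childs : Prop := ∀ (nums : List Int), Dom_get_childs nums → Spec_get_childs nums (get_childs nums)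

-- ===== LEMMAS AND PROOFS =====
-- the child set of value v, as A computes it
def pvF (nums : List Int) (v : Int) : List Int :=
  (PySem.List.pyRange 0 (nums.length : Int) 1).foldl
    (fun s j => if (PySem.List.pyGetD nums j 0 - v).natAbs ≠ 1 then PySem.Set.add s j else s)
    PySem.Set.empty

-- the same child set as a filter
def pvFilt (nums : List Int) (v : Int) : List Int :=
  (PySem.List.pyRange 0 (nums.length : Int) 1).filter
    (fun j => decide ((PySem.List.pyGetD nums j 0 - v).natAbs ≠ 1))

-- indices holding value u, in order
def pvG (nums : List Int) (u : Int) : List Int :=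
  (PySem.List.pyRange 0 (nums.length : Int) 1).filter
    (fun j => PySem.List.pyGetD nums j 0 == u)

def pvStepA (nums : List Int) (d : PySem.Dict Int (List Int)) (index : Int) : PySem.Dict Int (List Int) :=
  if d.contains (index - 1) && (PySem.List.pyGet? nums (index - 1) == PySem.List.pyGet? nums index) then
    d.insert index (d.getD (index - 1) [])
  else
    d.insert index (pvF nums (PySem.List.pyGetD nums index 0))

def pvRow (nums : List Int) (j : Nat) : Int × List Int :=
  ((j : Int), pvF nums (PySem.List.pyGetD nums (j : Int) 0))

lemma pv_nodup_idx (k : Nat) : ((List.range k).map (fun j : Nat => (j : Int))).Nodup :=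
  (List.nodup_range).map (fun a b h => by exact_mod_cast h)

lemma pvA_inv (nums : List Int) : ∀ k, k ≤ nums.length →
    ((((List.range k).map (fun j : Nat => (j : Int))).foldl (pvStepA nums) PySem.Dict.empty).items
      = (List.range k).map (pvRow nums)) := by
  intro k hk
  induction k with
  | zero => rfl
  | succ k ih =>
    have hk' : k ≤ nums.length := Nat.le_of_succ_le hk
    have IH := ih hk'
    set d := (((List.range k).map (fun j : Nat => (j : Int))).foldl (pvStepA nums) PySem.Dict.empty) with hd
    have hkeys : d.keys = (List.range k).map (fun j : Nat => (j : Int)) := by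
      show d.items.map (·.1) = _
      rw [IH, List.map_map]; rfl
    have hnd : d.keys.Nodup := by rw [hkeys]; exact pv_nodup_idx k
    have hnotc : d.contains (k : Int) = false := by
      rw [PySem.Dict.contains_eq_decide_mem_keys, hkeys]
      simp
    rw [List.range_succ, List.map_append, List.foldl_append, List.map_append, ← IH, ← hd]
    simp only [List.map_cons, List.map_nil, List.foldl_cons, List.foldl_nil]
    show (pvStepA nums d (k : Int)).items = d.items ++ [pvRow nums k]
    unfold pvStepA
    by_cases hg : (d.contains ((k : Int) - 1) && (PySem.List.pyGet? nums ((k : Int) - 1) == PySem.List.pyGet? nums (k : Int))) = true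
    · rw [if_pos hg]
      obtain ⟨hc, he⟩ := Bool.and_eq_true_iff.mp hg
      rcases Nat.eq_zero_or_pos k with h0 | hpos
      · exfalso; subst h0
        rw [PySem.Dict.contains_eq_decide_mem_keys, hkeys] at hc
        simp at hc
      · have hcast : ((k : Int) - 1) = ((k - 1 : Nat) : Int) := by
          omega
        have hrow : (((k - 1 : Nat) : Int), pvF nums (PySem.List.pyGetD nums ((k - 1 : Nat) : Int) 0)) ∈ d.items := by
          rw [IH]; exact List.mem_map_of_mem (List.mem_range.mpr (by omega))
        have hgd : d.getD ((k : Int) - 1) [] = pvF nums (PySem.List.pyGetD nums ((k - 1 : Nat) : Int) 0) := by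
          rw [hcast]; exact PySem.Dict.getD_of_mem_items d hrow hnd []
        have heq : PySem.List.pyGetD nums ((k - 1 : Nat) : Int) 0 = PySem.List.pyGetD nums (k : Int) 0 := by
          rw [hcast] at he
          rw [PySem.List.pyGet?_natCast, PySem.List.pyGet?_natCast] at he
          have := (beq_iff_eq).mp he
          rw [PySem.List.pyGetD_natCast, PySem.List.pyGetD_natCast]
          have hk1 : k - 1 < nums.length := by omega
          have hk2 : k < nums.length := by omega
          simp [List.getD, List.getElem?_eq_getElem hk1, List.getElem?_eq_getElem hk2] at this ⊢
          exact this
        rw [hgd, heq, PySem.Dict.items_insert_of_not_contains d _ hnotc]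
        rfl
    · rw [if_neg hg, PySem.Dict.items_insert_of_not_contains d _ hnotc]
      rfl

-- a conditional fold of Set.add over a nodup list of fresh elements is a filter
lemma pv_foldl_addif (P : Int → Prop) [DecidablePred P] :
    ∀ (l : List Int) (s : List Int), l.Nodup → (∀ x ∈ l, x ∉ s) →
      l.foldl (fun s j => if P j then PySem.Set.add s j else s) s
        = s ++ l.filter (fun j => decide (P j)) := by
  intro l
  induction l with
  | nil => intro s _ _; simp
  | cons x t ih =>
    intro s hnd hfresh
    rcases List.nodup_cons.mp hnd with ⟨hxt, hndt⟩
    by_cases hP : P x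
    · have hadd : PySem.Set.add s x = s ++ [x] :=
        PySem.Set.add_of_not_mem (hfresh x (List.mem_cons_self))
      simp only [List.foldl_cons, if_pos hP, hadd]
      rw [ih (s ++ [x]) hndt (by
        intro y hy hmem
        rcases List.mem_append.mp hmem with h | h
        · exact hfresh y (List.mem_cons_of_mem _ hy) h
        · rcases List.mem_singleton.mp h with rfl
          exact hxt hy)]
      simp [hP]
    · simp only [List.foldl_cons, if_neg hP]
      rw [ih s hndt (fun y hy => hfresh y (List.mem_cons_of_mem _ hy))]
      simp [hP]

lemma pvF_eq_filt (nums : List Int) (v : Int) : pvF nums v = pvFilt nums v := by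
  unfold pvF pvFilt
  rw [pv_foldl_addif _ _ PySem.Set.empty (PySem.List.nodup_pyRange_one 0 (nums.length : Int))
    (by intro x _ hx; exact (List.not_mem_nil hx))]
  rfl

-- groups characterisation: after the grouping pass, the bucket of u is exactly pvG u
lemma pv_groups_getD (nums : List Int) (u : Int) :
    ((PySem.List.enumerate nums).foldl
        (fun d iv => d.modify iv.2 [] (fun l => l ++ [iv.1])) PySem.Dict.empty).getD u []
      = pvG nums u := by
  have h1 : ((PySem.List.enumerate nums).foldl
        (fun d iv => d.modify iv.2 [] (fun l => l ++ [iv.1]))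
        (PySem.Dict.empty : PySem.Dict Int (List Int)))
      = (((PySem.List.enumerate nums).map Prod.swap).foldl
        (fun d p => d.modify p.1 [] (fun l => l ++ [p.2])) PySem.Dict.empty) := by
    rw [List.foldl_map]
    rfl
  rw [h1, PySem.Dict.getD_foldl_modify_append, PySem.Dict.getD_empty, List.nil_append]
  rw [PySem.List.enumerate_eq_map_pyRange nums 0, List.map_map, List.filter_map, List.map_map]
  unfold pvG
  simp only [Function.comp_def, Prod.swap]
  simp

-- lookup in a dict built by inserting f v for each v of l
lemma pv_getD_foldl_insert (f : Int → List Int) :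
    ∀ (l : List Int) (m : PySem.Dict Int (List Int)) (v : Int), v ∈ l →
      (l.foldl (fun m v => m.insert v (f v)) m).getD v [] = f v := by
  intro l
  induction l using List.reverseRecOn with
  | nil => intro m v hv; simp at hv
  | append_singleton t x ih =>
    intro m v hv
    rw [List.foldl_append, List.foldl_cons, List.foldl_nil, PySem.Dict.getD_insert]
    by_cases hvx : v = x
    · simp [hvx]
    · have hvt : v ∈ t := by
        rcases List.mem_append.mp hv with h | h
        · exact h
        · exact absurd (List.mem_singleton.mp h) hvx
      rw [if_neg hvx, ih m v hvt]

-- items of the final per-index dict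
lemma pv_items_res (nums : List Int) (memo : PySem.Dict Int (List Int)) :
    ((PySem.List.enumerate nums).foldl
        (fun d iv => d.insert iv.1 (memo.getD iv.2 [])) PySem.Dict.empty).items
      = (PySem.List.enumerate nums).map (fun iv => (iv.1, memo.getD iv.2 [])) := by
  induction nums using List.reverseRecOn with
  | nil => rfl
  | append_singleton xs x ih =>
    rw [PySem.List.enumerate_append]
    simp only [List.foldl_append, PySem.List.enumerate_cons, PySem.List.enumerate_nil,
      List.foldl_cons, List.foldl_nil, List.map_append, List.map_cons, List.map_nil]
    set d := ((PySem.List.enumerate xs).foldl (fun d iv => d.insert iv.1 (memo.getD iv.2 [])) PySem.Dict.empty) with hd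
    have hkeys : d.keys = (PySem.List.enumerate xs).map (·.1) := by
      show d.items.map (·.1) = _
      rw [ih, List.map_map]; rfl
    have hnotc : d.contains (0 + (xs.length : Int)) = false := by
      rw [PySem.Dict.contains_eq_decide_mem_keys, hkeys, PySem.List.map_fst_enumerate]
      simp only [decide_eq_false_iff_not, PySem.List.mem_pyRange_one]
      omega
    rw [PySem.Dict.items_insert_of_not_contains d _ hnotc, ih]

-- diff-of-diff equals A's filter, for any value v
lemma pv_diff_eq_filt (nums : List Int) (v : Int) :
    PySem.Set.diff
        (PySem.Set.diff (PySem.Set.ofList (PySem.List.pyRange 0 (nums.length : Int) 1))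
          (PySem.Set.ofList (pvG nums (v - 1))))
        (PySem.Set.ofList (pvG nums (v + 1)))
      = pvFilt nums v := by
  have hall : PySem.Set.ofList (PySem.List.pyRange 0 (nums.length : Int) 1)
      = PySem.List.pyRange 0 (nums.length : Int) 1 :=
    PySem.Set.ofList_eq_self_of_nodup _ (PySem.List.nodup_pyRange_one 0 (nums.length : Int))
  have hG : ∀ u, PySem.Set.ofList (pvG nums u) = pvG nums u := fun u =>
    PySem.Set.ofList_eq_self_of_nodup _
      (List.Nodup.filter _ (PySem.List.nodup_pyRange_one 0 (nums.length : Int)))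
  show List.filter _ (List.filter _ _) = _
  rw [hall, hG, hG, List.filter_filter]
  unfold pvFilt
  refine List.filter_congr ?_
  intro j hj
  have hmemG : ∀ u, (j ∈ pvG nums u) ↔ PySem.List.pyGetD nums j 0 = u := by
    intro u
    unfold pvG
    rw [List.mem_filter]
    constructor
    · rintro ⟨_, h⟩; exact beq_iff_eq.mp h
    · intro h; exact ⟨hj, beq_iff_eq.mpr h⟩
  simp only [PySem.Set.contains_eq_listContains, List.contains_eq_mem]
  have key : ((PySem.List.pyGetD nums j 0 - v).natAbs ≠ 1)
      ↔ (¬ j ∈ pvG nums (v + 1) ∧ ¬ j ∈ pvG nums (v - 1)) := by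
    rw [hmemG, hmemG]
    omega
  rw [← decide_not, ← decide_not, ← Bool.decide_and]
  exact decide_eq_decide.mpr key.symm

lemma pv_spec (nums : List Int) : get_childs nums = get_childs_alt nums := by
  have hA : get_childs nums = (List.range nums.length).map (pvRow nums) := by
    show (((PySem.List.pyRange 0 (nums.length : Int) 1).foldl (pvStepA nums) PySem.Dict.empty)).items = _
    rw [PySem.List.pyRange_zero_natCast]
    exact pvA_inv nums nums.length (le_refl _)
  rw [hA]
  simp only [get_childs_alt]
  rw [pv_items_res]
  apply List.ext_getElem
  · simp [PySem.List.length_enumerate]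
  · intro i h1 h2
    simp only [List.getElem_map, List.getElem_range, PySem.List.getElem_enumerate]
    have hi : i < nums.length := by simpa [PySem.List.length_enumerate] using h2
    have hnumsI : PySem.List.pyGetD nums ((i : Nat) : Int) 0 = nums[i] := by
      rw [PySem.List.pyGetD_natCast]
      simp [List.getD, List.getElem?_eq_getElem hi]
    unfold pvRow
    rw [hnumsI]
    simp only [Prod.mk.injEq]
    refine ⟨by omega, ?_⟩
    have hv : nums[i] ∈
        ((PySem.List.enumerate nums).foldl
          (fun d iv => d.modify iv.2 [] (fun l => l ++ [iv.1])) PySem.Dict.empty).keys := by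
      rw [PySem.Dict.keys_foldl_modify_key, PySem.List.map_snd_enumerate]
      rw [PySem.Set.mem_update]
      exact Or.inr (List.getElem_mem hi)
    rw [pvF_eq_filt, ← pv_diff_eq_filt nums nums[i],
      ← pv_groups_getD nums (nums[i] - 1), ← pv_groups_getD nums (nums[i] + 1)]
    exact (pv_getD_foldl_insert
      (fun v =>
        PySem.Set.diff
          (PySem.Set.diff (PySem.Set.ofList (PySem.List.pyRange 0 (nums.length : Int) 1))
            (PySem.Set.ofList
              (((PySem.List.enumerate nums).foldl
                  (fun d iv => d.modify iv.2 [] (fun l => l ++ [iv.1])) PySem.Dict.empty).getD (v - 1) [])))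
          (PySem.Set.ofList
            (((PySem.List.enumerate nums).foldl
                (fun d iv => d.modify iv.2 [] (fun l => l ++ [iv.1])) PySem.Dict.empty).getD (v + 1) [])))
      _ _ nums[i] hv).symm

-- ===== VERDICT (by name: the statement is the Claim_ definition above) =====
theorem get_childs_spec : Claim_equal_get_childs := by
  intro nums _
  exact pv_spec nums
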